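-- pv_equiv track=rewrite | github.com/westonwestenborg/criterion-closet-picks | scripts/normalize_guests.py | dedup_picks_raw
-- ===== SOURCE A (Python) =====
-- def dedup_picks_raw(picks_raw: list[dict]) -> list[dict]:
--     """Deduplicate raw picks by (guest_slug, film_id). Prefer criterion-sourced entries."""
--     seen: dict[tuple, int] = {}
--     result = []
--     for p in picks_raw:
--         key = (p["guest_slug"], p.get("film_id", ""))
--         if key not in seen:
--             seen[key] = len(result)
--             result.append(p)
--         else:
--             # Prefer criterion-sourced entry over letterboxd
--             existing_idx = seen[key]
--             if p.get("source") == "criterion" and result[existing_idx].get("source") != "criterion":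
--                 result[existing_idx] = p
--     return result
-- ===== SOURCE B (Python) =====
-- def dedup_picks_raw(picks_raw: list[dict]) -> list[dict]:
--     """Deduplicate raw picks by (guest_slug, film_id). Prefer criterion-sourced entries."""
--     # Pass 1: best entry per key (first criterion-sourced one, else first one).
--     chosen: dict[tuple, dict] = {}
--     for p in picks_raw:
--         k = (p["guest_slug"], p.get("film_id", ""))
--         q = chosen.get(k)
--         if q is None or (p.get("source") == "criterion" and q.get("source") != "criterion"):
--             chosen[k] = p
--     # Pass 2: emit each key's chosen entry in first-appearance order.
--     seen: set = set()
--     out = []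
--     for p in picks_raw:
--         k = (p["guest_slug"], p.get("film_id", ""))
--         if k not in seen:
--             seen.add(k)
--             out.append(chosen[k])
--     return out
-- ===== Notes on version B (the rewrite author's own statement) =====
-- stated objective: alternative
-- what changed: Instead of mutating the result list in place at a stored index, B builds a best-per-key dict in one pass and then emits each key's chosen entry in first-occurrence order in a second pass.
import Mathlib
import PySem

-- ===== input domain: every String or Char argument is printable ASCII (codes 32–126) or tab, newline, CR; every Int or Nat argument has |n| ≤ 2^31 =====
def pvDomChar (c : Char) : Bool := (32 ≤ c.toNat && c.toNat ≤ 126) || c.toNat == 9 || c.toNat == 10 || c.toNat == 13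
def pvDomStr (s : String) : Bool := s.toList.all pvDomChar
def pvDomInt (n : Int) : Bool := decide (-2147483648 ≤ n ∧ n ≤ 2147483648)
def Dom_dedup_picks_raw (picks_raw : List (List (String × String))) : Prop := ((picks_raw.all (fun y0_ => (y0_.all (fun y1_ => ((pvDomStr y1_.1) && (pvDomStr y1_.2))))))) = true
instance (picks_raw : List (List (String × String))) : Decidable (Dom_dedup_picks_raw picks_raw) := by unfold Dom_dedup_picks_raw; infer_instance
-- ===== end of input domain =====

-- B replaces A's in-place update of result[seen[key]] by a best-per-key dict built in
-- one pass plus a second pass emitting each key's chosen entry in first-occurrence order.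

-- ===== PORT A =====
-- key = (p["guest_slug"], p.get("film_id", "")); getD "guest_slug" "" is exact under
-- Pre_ (the key is present; the Python raises KeyError otherwise).
def pvKeyOf (p : List (String × String)) : String × String :=
  ((PySem.Dict.mk p).getD "guest_slug" "", (PySem.Dict.mk p).getD "film_id" "")

-- p.get("source") == "criterion"
def pvIsCrit (p : List (String × String)) : Bool :=
  (PySem.Dict.mk p).get? "source" == some "criterion"

def dedup_picks_raw (picks_raw : List (List (String × String))) : List (List (String × String)) :=
  (picks_raw.foldl
    (fun (st : PySem.Dict (String × String) Int × List (List (String × String))) p =>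
      let key := pvKeyOf p
      if st.1.contains key = false then
        (st.1.insert key (st.2.length : Int), st.2 ++ [p])
      else
        let existing_idx := st.1.getD key 0
        if pvIsCrit p && !(pvIsCrit (PySem.List.pyGetD st.2 existing_idx [])) then
          (st.1, PySem.List.pySetD st.2 existing_idx p)
        else st)
    (PySem.Dict.empty, [])).2

-- ===== PORT B =====
-- pass 1: best entry per key (first criterion-sourced one, else first one)
def pvChosen (picks_raw : List (List (String × String))) :
    PySem.Dict (String × String) (List (String × String)) :=
  picks_raw.foldl
    (fun c p =>
      let k := pvKeyOf p
      match c.get? k with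
      | none => c.insert k p
      | some q => if pvIsCrit p && !(pvIsCrit q) then c.insert k p else c)
    PySem.Dict.empty

def dedup_picks_raw_alt (picks_raw : List (List (String × String))) : List (List (String × String)) :=
  let chosen := pvChosen picks_raw
  (picks_raw.foldl
    (fun (st : PySem.Set (String × String) × List (List (String × String))) p =>
      let k := pvKeyOf p
      if PySem.Set.contains st.1 k then st
      else (PySem.Set.add st.1 k, st.2 ++ [chosen.getD k p]))
    (PySem.Set.empty, [])).2

-- ===== PRECONDITION & SPEC =====
-- Pre_ excludes exactly the inputs on which the Python A raises KeyError: a pick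
-- without a "guest_slug" key.
def Pre_dedup_picks_raw (picks_raw : List (List (String × String))) : Prop :=
  ∀ p ∈ picks_raw, (PySem.Dict.mk p).contains "guest_slug" = true
instance (picks_raw : List (List (String × String))) : Decidable (Pre_dedup_picks_raw picks_raw) := by unfold Pre_dedup_picks_raw; infer_instance

def pvWitness_dedup_picks_raw : (List (List (String × String))) :=
  [[("guest_slug", "g1"), ("film_id", "f1"), ("source", "letterboxd")],
   [("guest_slug", "g1"), ("film_id", "f1"), ("source", "criterion")],
   [("guest_slug", "g2"), ("source", "criterion")]]

def Spec_dedup_picks_raw (picks_raw : List (List (String × String))) (out : List (List (String × String))) : Prop := out = dedup_picks_raw_alt picks_raw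
instance (picks_raw : List (List (String × String))) (out : List (List (String × String))) : Decidable (Spec_dedup_picks_raw picks_raw out) := by unfold Spec_dedup_picks_raw; infer_instance

-- ===== CLAIM (what is proved, stated in full; the proofs are below) =====
def Claim_equal_dedup_picks_raw : Prop := ∀ (picks_raw : List (List (String × String))), Dom_dedup_picks_raw picks_raw → Pre_dedup_picks_raw picks_raw → Spec_dedup_picks_raw picks_raw (dedup_picks_raw picks_raw)

-- ===== LEMMAS AND PROOFS =====

-- the keys of l in first-occurrence order
def pvKeys (l : List (List (String × String))) : List (String × String) :=
  PySem.Set.ofList (l.map pvKeyOf)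

-- the entry both programs keep for key k: first criterion-sourced one, else first one
def pvBest (l : List (List (String × String))) (k : String × String) : List (String × String) :=
  match l.find? (fun p => pvKeyOf p == k && pvIsCrit p) with
  | some q => q
  | none => (l.find? (fun p => pvKeyOf p == k)).getD []

-- the loop bodies of the two ports, named so List.foldl_append applies
def pvStepA (st : PySem.Dict (String × String) Int × List (List (String × String)))
    (p : List (String × String)) :
    PySem.Dict (String × String) Int × List (List (String × String)) :=
  if st.1.contains (pvKeyOf p) = false then
    (st.1.insert (pvKeyOf p) (st.2.length : Int), st.2 ++ [p])
  else
    if pvIsCrit p && !(pvIsCrit (PySem.List.pyGetD st.2 (st.1.getD (pvKeyOf p) 0) [])) then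
      (st.1, PySem.List.pySetD st.2 (st.1.getD (pvKeyOf p) 0) p)
    else st

def pvStepC (c : PySem.Dict (String × String) (List (String × String)))
    (p : List (String × String)) :
    PySem.Dict (String × String) (List (String × String)) :=
  match c.get? (pvKeyOf p) with
  | none => c.insert (pvKeyOf p) p
  | some q => if pvIsCrit p && !(pvIsCrit q) then c.insert (pvKeyOf p) p else c

def pvStepS (c : PySem.Dict (String × String) (List (String × String)))
    (st : PySem.Set (String × String) × List (List (String × String)))
    (p : List (String × String)) :
    PySem.Set (String × String) × List (List (String × String)) :=
  if PySem.Set.contains st.1 (pvKeyOf p) then st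
  else (PySem.Set.add st.1 (pvKeyOf p), st.2 ++ [c.getD (pvKeyOf p) p])

theorem pvStepA_new (st : PySem.Dict (String × String) Int × List (List (String × String)))
    (p : List (String × String)) (h : st.1.contains (pvKeyOf p) = false) :
    pvStepA st p = (st.1.insert (pvKeyOf p) (st.2.length : Int), st.2 ++ [p]) := by
  unfold pvStepA; rw [h]; simp

theorem pvStepA_old_upd (st : PySem.Dict (String × String) Int × List (List (String × String)))
    (p : List (String × String)) (h : st.1.contains (pvKeyOf p) = true)
    (hcrit : (pvIsCrit p && !(pvIsCrit (PySem.List.pyGetD st.2 (st.1.getD (pvKeyOf p) 0) []))) = true) :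
    pvStepA st p = (st.1, PySem.List.pySetD st.2 (st.1.getD (pvKeyOf p) 0) p) := by
  unfold pvStepA; rw [h, hcrit]; simp

theorem pvStepA_old_keep (st : PySem.Dict (String × String) Int × List (List (String × String)))
    (p : List (String × String)) (h : st.1.contains (pvKeyOf p) = true)
    (hcrit : (pvIsCrit p && !(pvIsCrit (PySem.List.pyGetD st.2 (st.1.getD (pvKeyOf p) 0) []))) = false) :
    pvStepA st p = st := by
  unfold pvStepA; rw [h, hcrit]; simp

theorem pvStepS_mem (c : PySem.Dict (String × String) (List (String × String)))
    (st : PySem.Set (String × String) × List (List (String × String)))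
    (p : List (String × String)) (h : PySem.Set.contains st.1 (pvKeyOf p) = true) :
    pvStepS c st p = st := by
  unfold pvStepS; rw [h]; simp

theorem pvStepS_new (c : PySem.Dict (String × String) (List (String × String)))
    (st : PySem.Set (String × String) × List (List (String × String)))
    (p : List (String × String)) (h : PySem.Set.contains st.1 (pvKeyOf p) = false) :
    pvStepS c st p = (PySem.Set.add st.1 (pvKeyOf p), st.2 ++ [c.getD (pvKeyOf p) p]) := by
  unfold pvStepS; rw [h]; simp

theorem pvA_eq (l : List (List (String × String))) :
    dedup_picks_raw l = (l.foldl pvStepA (PySem.Dict.empty, [])).2 := rfl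

theorem pvChosen_eq (l : List (List (String × String))) :
    pvChosen l = l.foldl pvStepC PySem.Dict.empty := rfl

theorem pvB_eq (l : List (List (String × String))) :
    dedup_picks_raw_alt l = (l.foldl (pvStepS (pvChosen l)) (PySem.Set.empty, [])).2 := rfl

theorem mem_pvKeys (l : List (List (String × String))) (k : String × String) :
    k ∈ pvKeys l ↔ k ∈ l.map pvKeyOf := by
  unfold pvKeys; exact PySem.Set.mem_ofList _ _

theorem nodup_pvKeys (l : List (List (String × String))) : (pvKeys l).Nodup := by
  unfold pvKeys; exact PySem.Set.nodup_ofList _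

theorem pvKeys_append (l : List (List (String × String))) (p : List (String × String)) :
    pvKeys (l ++ [p]) =
      if pvKeyOf p ∈ pvKeys l then pvKeys l else pvKeys l ++ [pvKeyOf p] := by
  unfold pvKeys
  simp only [List.map_append, List.map_cons, List.map_nil]
  rw [PySem.Set.ofList_append_singleton, PySem.Set.add_eq_ite]

theorem pvBest_append_ne (l : List (List (String × String))) (p : List (String × String))
    (k : String × String) (h : pvKeyOf p ≠ k) : pvBest (l ++ [p]) k = pvBest l k := by
  unfold pvBest
  rw [List.find?_append, List.find?_append]
  have hb : (pvKeyOf p == k) = false := by simpa using h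
  have h1 : [p].find? (fun q => pvKeyOf q == k && pvIsCrit q) = none := by
    simp [List.find?, hb]
  have h2 : [p].find? (fun q => pvKeyOf q == k) = none := by
    simp [List.find?, hb]
  rw [h1, h2, Option.or_none, Option.or_none]

theorem pvBest_append_new (l : List (List (String × String))) (p : List (String × String))
    (k : String × String) (h : pvKeyOf p = k) (hk : k ∉ l.map pvKeyOf) :
    pvBest (l ++ [p]) k = p := by
  have hl1 : l.find? (fun q => pvKeyOf q == k && pvIsCrit q) = none := by
    rw [List.find?_eq_none]
    intro x hx
    have hne : pvKeyOf x ≠ k := fun he => hk (he ▸ List.mem_map_of_mem hx)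
    simp [hne]
  have hl2 : l.find? (fun q => pvKeyOf q == k) = none := by
    rw [List.find?_eq_none]
    intro x hx
    have hne : pvKeyOf x ≠ k := fun he => hk (he ▸ List.mem_map_of_mem hx)
    simp [hne]
  unfold pvBest
  rw [List.find?_append, List.find?_append, hl1, hl2, Option.none_or, Option.none_or]
  by_cases hc : pvIsCrit p
  · simp [List.find?, h, hc]
  · simp [List.find?, h, hc]

theorem pvBest_append_mem (l : List (List (String × String))) (p : List (String × String))
    (k : String × String) (h : pvKeyOf p = k) (hk : k ∈ l.map pvKeyOf) :
    pvBest (l ++ [p]) k =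
      if pvIsCrit p && !(pvIsCrit (pvBest l k)) then p else pvBest l k := by
  rcases hf : l.find? (fun q => pvKeyOf q == k && pvIsCrit q) with _ | q
  · rcases hg : l.find? (fun q => pvKeyOf q == k) with _ | q0
    · rcases List.mem_map.mp hk with ⟨x, hx, hkx⟩
      rw [List.find?_eq_none] at hg
      exact absurd (by simp [hkx]) (hg x hx)
    · have hb : pvBest l k = q0 := by unfold pvBest; rw [hf, hg]; rfl
      have hq0crit : pvIsCrit q0 = false := by
        rw [List.find?_eq_none] at hf
        have hq0mem := List.mem_of_find?_eq_some hg
        have h2 := hf q0 hq0mem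
        have hq0k : pvKeyOf q0 = k := by
          have h3 := List.find?_some hg; simpa using h3
        simp [hq0k] at h2
        exact h2
      unfold pvBest
      rw [List.find?_append, List.find?_append, hf, hg, Option.none_or]
      by_cases hc : pvIsCrit p
      · simp [List.find?, h, hc, hq0crit]
      · simp [List.find?, h, hc, hq0crit]
  · have hb : pvBest l k = q := by unfold pvBest; rw [hf]
    have hqcrit : pvIsCrit q = true := by
      have h2 := List.find?_some hf
      simp at h2
      exact h2.2
    unfold pvBest
    rw [List.find?_append, hf]
    simp [Option.or, hqcrit]

theorem pv_map_set_of_agree (ks : List (String × String))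
    (hnd : ks.Nodup) (i : Nat) (hi : i < ks.length)
    (f f' : String × String → List (String × String)) (v : List (String × String))
    (hoff : ∀ k' ∈ ks, k' ≠ ks[i] → f' k' = f k') (hat : f' ks[i] = v) :
    ks.map f' = (ks.map f).set i v := by
  apply List.ext_getElem (by simp)
  intro j h1 h2
  simp only [List.length_map] at h1
  rw [List.getElem_set, List.getElem_map]
  by_cases hj : i = j
  · subst hj; simp [hat]
  · rw [if_neg hj]
    rw [List.getElem_map]
    refine hoff _ (List.getElem_mem _) ?_
    intro he
    exact hj ((List.Nodup.getElem_inj_iff hnd).mp he.symm)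

-- invariant of A's loop: result is best-per-key in first-occurrence key order,
-- seen contains exactly the keys so far, mapped to their first-occurrence index
theorem pvA_inv (l : List (List (String × String))) :
    (l.foldl pvStepA (PySem.Dict.empty, [])).2 = (pvKeys l).map (pvBest l)
  ∧ (∀ k, ((l.foldl pvStepA (PySem.Dict.empty, [])).1.contains k = true ↔ k ∈ pvKeys l))
  ∧ (∀ k, k ∈ pvKeys l →
      (l.foldl pvStepA (PySem.Dict.empty, [])).1.getD k 0 = ((pvKeys l).idxOf k : Int)) := by
  induction l using List.reverseRecOn with
  | nil => simp [pvKeys, PySem.Set.ofList]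
  | append_singleton l p ih =>
    obtain ⟨ihr, ihc, ihi⟩ := ih
    rw [List.foldl_append]
    simp only [List.foldl_cons, List.foldl_nil]
    set st := l.foldl pvStepA (PySem.Dict.empty, []) with hst
    by_cases hmem : pvKeyOf p ∈ pvKeys l
    · -- existing key
      have hcont : st.1.contains (pvKeyOf p) = true := (ihc _).mpr hmem
      have hkmem : pvKeyOf p ∈ l.map pvKeyOf := (mem_pvKeys l _).mp hmem
      have hkeys : pvKeys (l ++ [p]) = pvKeys l := by rw [pvKeys_append, if_pos hmem]
      have hi : (pvKeys l).idxOf (pvKeyOf p) < (pvKeys l).length :=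
        List.idxOf_lt_length_of_mem hmem
      have hidx : st.1.getD (pvKeyOf p) 0 = (((pvKeys l).idxOf (pvKeyOf p) : Nat) : Int) :=
        ihi _ hmem
      have hk0at : (pvKeys l)[(pvKeys l).idxOf (pvKeyOf p)] = pvKeyOf p :=
        List.getElem_idxOf hi
      have hget : PySem.List.pyGetD st.2 (st.1.getD (pvKeyOf p) 0) [] = pvBest l (pvKeyOf p) := by
        rw [hidx, PySem.List.pyGetD_natCast, ihr,
          List.getD_eq_getElem _ _ (by simpa using hi), List.getElem_map, hk0at]
      by_cases hcrit : (pvIsCrit p && !(pvIsCrit (pvBest l (pvKeyOf p)))) = true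
      · rw [pvStepA_old_upd st p hcont (by rw [hget]; exact hcrit)]
        dsimp only
        refine ⟨?_, ?_, ?_⟩
        · rw [hkeys]
          simp only [hidx, PySem.List.pySetD_natCast, ihr]
          symm
          refine pv_map_set_of_agree _ (nodup_pvKeys l) _ hi _ _ _ ?_ ?_
          · intro k' hk' hne
            rw [hk0at] at hne
            exact pvBest_append_ne l p k' (fun he => hne he.symm)
          · rw [hk0at, pvBest_append_mem l p _ rfl hkmem, if_pos hcrit]
        · intro k; rw [hkeys]; exact ihc k
        · intro k hk; rw [hkeys] at hk ⊢; exact ihi k hk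
      · rw [pvStepA_old_keep st p hcont
          (by rw [hget]; exact Bool.eq_false_iff.mpr (fun h => hcrit h))]
        refine ⟨?_, ?_, ?_⟩
        · rw [hkeys, ihr]
          apply List.map_congr_left
          intro k' hk'
          by_cases hne : k' = pvKeyOf p
          · subst hne
            rw [pvBest_append_mem l p _ rfl hkmem,
              if_neg (by exact fun h => hcrit h)]
          · exact (pvBest_append_ne l p k' (fun he => hne he.symm)).symm
        · intro k; rw [hkeys]; exact ihc k
        · intro k hk; rw [hkeys] at hk ⊢; exact ihi k hk
    · -- new key
      have hcont : st.1.contains (pvKeyOf p) = false := by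
        rcases Bool.eq_false_or_eq_true (st.1.contains (pvKeyOf p)) with h | h
        · exact absurd ((ihc _).mp h) hmem
        · exact h
      have hkmem : pvKeyOf p ∉ l.map pvKeyOf := fun h => hmem ((mem_pvKeys l _).mpr h)
      have hkeys : pvKeys (l ++ [p]) = pvKeys l ++ [pvKeyOf p] := by
        rw [pvKeys_append, if_neg hmem]
      have hlen : st.2.length = (pvKeys l).length := by rw [ihr, List.length_map]
      rw [pvStepA_new st p hcont]
      dsimp only
      refine ⟨?_, ?_, ?_⟩
      · rw [hkeys, List.map_append, ihr]
        congr 1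
        · apply List.map_congr_left
          intro k' hk'
          exact (pvBest_append_ne l p k' (fun he => hmem (he ▸ hk'))).symm
        · simp [pvBest_append_new l p _ rfl hkmem]
      · intro k
        rw [hkeys, PySem.Dict.contains_insert]
        simp only [List.mem_append, List.mem_singleton, Bool.or_eq_true, beq_iff_eq]
        rw [ihc k]
        tauto
      · intro k hk
        rw [hkeys] at hk ⊢
        rw [PySem.Dict.getD_insert]
        by_cases hke : k = pvKeyOf p
        · subst hke
          rw [if_pos rfl, hlen, List.idxOf_append_of_notMem hmem]
          simp
        · rw [if_neg hke]
          have hkl : k ∈ pvKeys l := by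
            rcases List.mem_append.mp hk with h | h
            · exact h
            · exact absurd (List.mem_singleton.mp h) hke
          rw [List.idxOf_append_of_mem hkl]
          exact ihi k hkl

-- invariant of B's first pass: chosen maps every key seen so far to its best entry
theorem pvChosen_get? (l : List (List (String × String))) :
    ∀ k, (pvChosen l).get? k = if k ∈ pvKeys l then some (pvBest l k) else none := by
  induction l using List.reverseRecOn with
  | nil => intro k; simp [pvChosen, pvKeys, PySem.Set.ofList]
  | append_singleton l p ih =>
    intro k
    rw [pvChosen_eq, List.foldl_append, ← pvChosen_eq]
    simp only [List.foldl_cons, List.foldl_nil]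
    by_cases hmem : pvKeyOf p ∈ pvKeys l
    · have hkmem : pvKeyOf p ∈ l.map pvKeyOf := (mem_pvKeys l _).mp hmem
      have hkeys : pvKeys (l ++ [p]) = pvKeys l := by rw [pvKeys_append, if_pos hmem]
      have h0 : (pvChosen l).get? (pvKeyOf p) = some (pvBest l (pvKeyOf p)) := by
        rw [ih _, if_pos hmem]
      unfold pvStepC
      rw [h0]
      dsimp only
      by_cases hcrit : (pvIsCrit p && !(pvIsCrit (pvBest l (pvKeyOf p)))) = true
      · rw [if_pos hcrit, PySem.Dict.get?_insert, hkeys]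
        by_cases hke : k = pvKeyOf p
        · subst hke
          rw [if_pos rfl, if_pos hmem, pvBest_append_mem l p _ rfl hkmem, if_pos hcrit]
        · rw [if_neg hke, ih k]
          split
          · rw [pvBest_append_ne l p k (fun he => hke he.symm)]
          · rfl
      · rw [if_neg hcrit, ih k, hkeys]
        split
        · by_cases hke : k = pvKeyOf p
          · subst hke
            rw [pvBest_append_mem l p _ rfl hkmem, if_neg hcrit]
          · rw [pvBest_append_ne l p k (fun he => hke he.symm)]
        · rfl
    · have hkmem : pvKeyOf p ∉ l.map pvKeyOf := fun h => hmem ((mem_pvKeys l _).mpr h)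
      have hkeys : pvKeys (l ++ [p]) = pvKeys l ++ [pvKeyOf p] := by
        rw [pvKeys_append, if_neg hmem]
      have h0 : (pvChosen l).get? (pvKeyOf p) = none := by
        rw [ih _, if_neg hmem]
      unfold pvStepC
      rw [h0]
      dsimp only
      rw [PySem.Dict.get?_insert, hkeys]
      by_cases hke : k = pvKeyOf p
      · subst hke
        rw [if_pos rfl, if_pos (by simp), pvBest_append_new l p _ rfl hkmem]
      · rw [if_neg hke, ih k]
        have hmm : (k ∈ pvKeys l ++ [pvKeyOf p]) ↔ k ∈ pvKeys l := by
          simp [hke]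
        rw [if_congr hmm rfl rfl]
        split
        · rw [pvBest_append_ne l p k (fun he => hke he.symm)]
        · rfl

-- B's second pass emits, for each key in first-occurrence order, the dict's entry
theorem pvPass2 (c : PySem.Dict (String × String) (List (String × String)))
    (l : List (List (String × String)))
    (hc : ∀ p ∈ l, ((c.get? (pvKeyOf p)).isSome = true)) :
    (l.foldl (pvStepS c) (PySem.Set.empty, [])).1 = pvKeys l
  ∧ (l.foldl (pvStepS c) (PySem.Set.empty, [])).2 = (pvKeys l).map (fun k => c.getD k []) := by
  induction l using List.reverseRecOn with
  | nil => simp [pvKeys, PySem.Set.ofList, PySem.Set.empty]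
  | append_singleton l p ih =>
    obtain ⟨ih1, ih2⟩ := ih (fun q hq => hc q (List.mem_append.mpr (Or.inl hq)))
    rw [List.foldl_append]
    simp only [List.foldl_cons, List.foldl_nil]
    set st := l.foldl (pvStepS c) (PySem.Set.empty, []) with hst
    by_cases hmem : pvKeyOf p ∈ pvKeys l
    · have hkeys : pvKeys (l ++ [p]) = pvKeys l := by rw [pvKeys_append, if_pos hmem]
      rw [pvStepS_mem c st p (by rw [ih1]; exact (PySem.Set.contains_iff _ _).mpr hmem), hkeys]
      exact ⟨ih1, ih2⟩
    · have hkeys : pvKeys (l ++ [p]) = pvKeys l ++ [pvKeyOf p] := by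
        rw [pvKeys_append, if_neg hmem]
      have hcontains : PySem.Set.contains st.1 (pvKeyOf p) = false := by
        rw [ih1]
        rcases Bool.eq_false_or_eq_true (PySem.Set.contains (pvKeys l) (pvKeyOf p)) with h | h
        · exact absurd ((PySem.Set.contains_iff _ _).mp h) hmem
        · exact h
      rw [pvStepS_new c st p hcontains]
      dsimp only
      constructor
      · rw [hkeys, ih1, PySem.Set.add_of_not_mem hmem]
      · rw [hkeys, List.map_append, ih2]
        congr 1
        have hs := hc p (List.mem_append.mpr (Or.inr (List.mem_singleton_self p)))
        rcases ho : c.get? (pvKeyOf p) with _ | v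
        · rw [ho] at hs; simp at hs
        · simp only [List.map_cons, List.map_nil]
          rw [PySem.Dict.getD_of_get?_eq_some c [] ho, PySem.Dict.getD_of_get?_eq_some c p ho]

theorem pv_main (l : List (List (String × String))) :
    dedup_picks_raw l = dedup_picks_raw_alt l := by
  rw [pvA_eq, pvB_eq, (pvA_inv l).1]
  have hc : ∀ p ∈ l, ((pvChosen l).get? (pvKeyOf p)).isSome = true := by
    intro p hp
    rw [pvChosen_get? l _, if_pos ((mem_pvKeys l _).mpr (List.mem_map_of_mem hp))]
    rfl
  rw [(pvPass2 (pvChosen l) l hc).2]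
  apply List.map_congr_left
  intro k hk
  rw [PySem.Dict.getD_eq_get?_getD, pvChosen_get? l k, if_pos hk]
  rfl

-- ===== VERDICT (by name: the statement is the Claim_ definition above) =====
theorem dedup_picks_raw_spec : Claim_equal_dedup_picks_raw := by
  intro picks_raw _ _
  show dedup_picks_raw picks_raw = dedup_picks_raw_alt picks_raw
  exact pv_main picks_raw
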